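-- pv_equiv track=rewrite | github.com/VaclavTomecek/Kryptologie | ADFG(V)X/ADFGX.py | adfgx_encrypt
-- ===== SOURCE A (Python) =====
-- def split_into_groups(text, key):
--     # Rozděluje text na skupiny o délce odpovídající délce klíče.
--
--     size = len(key)
--     if size == 0:
--         raise ValueError("Key for splitting groups cannot be empty.")
--     text = text.replace(" ", "").strip()
--     groups = [text[i:i + size] for i in range(0, len(text), size)]
--     return ' '.join(groups)
--
-- def find_position_in_matrix(matrix, char):
--     # Hledá pozici znaku v ADFGX matici.
--     # Vrací odpovídající řádek a sloupec znaku jako písmena ADFGX.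
--
--     for i in range(1, len(matrix)):
--         for j in range(1, len(matrix[i])):
--             if matrix[i][j] == char:
--                 return matrix[0][i], matrix[j][0]
--     return None
--
-- def columnar_transposition(text, key):
--     # Provádí transpozici textu podle klíče (sloupcová transpozice).
--
--     col_count = len(key)
--     grid = ['' for _ in range(col_count)]
--     for i in range(len(text)):
--         grid[i % col_count] += text[i]
--     key_index = sorted(range(len(key)), key=lambda k: key[k])
--     transposed_text = ''.join(grid[i] for i in key_index)
--     return transposed_text
--
-- def adfgx_encrypt(text, key, matrix):
--     # Šifruje text pomocí ADFGX matice a sloupcové transpozice.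
--
--     encrypted_text = ''
--     for char in text:
--         position = find_position_in_matrix(matrix, char)
--         if position:
--             encrypted_text += position[0] + position[1]
--         else:
--             raise ValueError(f"Character '{char}' not found in the matrix.")
--     encrypted_text = columnar_transposition(encrypted_text, key)
--     return split_into_groups(encrypted_text, key)
-- ===== SOURCE B (Python) =====
-- def adfgx_encrypt(text, key, matrix):
--     # Record each symbol's first matrix position in a table built once, encode the
--     # text through it, then emit the ciphertext column by column in sorted-key
--     # order by gathering each column's characters directly from the stream.
--     loc = {}
--     for i, row in enumerate(matrix[1:], 1):
--         for j, cell in enumerate(row[1:], 1):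
--             loc.setdefault(cell, (i, j))
--
--     def encode(c):
--         i, j = loc[c]
--         return matrix[0][i] + matrix[j][0]
--
--     stream = ''.join(encode(c) for c in text)
--     n = len(key)
--     order = sorted(range(n), key=lambda k: key[k])
--     transposed = ''.join(ch for k in order
--                          for idx, ch in enumerate(stream) if idx % n == k)
--     cleaned = transposed.replace(' ', '').strip()
--     groups = []
--     while cleaned:
--         groups.append(cleaned[:n])
--         cleaned = cleaned[n:]
--     return ' '.join(groups)
-- ===== Notes on version B (the rewrite author's own statement) =====
-- stated objective: alternative
-- what changed: B records each symbol's first matrix position in a table built by one scan (instead of rescanning the whole matrix per text character), encodes the text through it, produces the transposition by gathering each column's characters directly from the encoded stream by index class instead of scattering into a grid, and groups with a consuming take/drop loop instead of A's range/slice comprehension.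
import Mathlib
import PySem

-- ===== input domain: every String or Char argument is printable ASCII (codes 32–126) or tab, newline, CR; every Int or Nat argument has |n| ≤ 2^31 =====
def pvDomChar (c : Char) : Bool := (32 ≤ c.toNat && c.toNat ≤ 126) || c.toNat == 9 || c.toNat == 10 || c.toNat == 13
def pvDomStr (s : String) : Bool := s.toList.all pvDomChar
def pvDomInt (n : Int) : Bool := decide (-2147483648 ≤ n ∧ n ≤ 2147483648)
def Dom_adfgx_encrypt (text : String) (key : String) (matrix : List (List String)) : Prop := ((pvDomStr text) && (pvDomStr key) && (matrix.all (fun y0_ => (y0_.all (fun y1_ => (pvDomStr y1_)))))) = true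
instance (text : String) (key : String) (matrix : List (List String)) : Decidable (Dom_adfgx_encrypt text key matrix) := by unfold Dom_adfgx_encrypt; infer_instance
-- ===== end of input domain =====

-- B builds the symbol→position table once, gathers each transposition column
-- straight from the encoded stream (no grid), and groups with a take/drop loop;
-- same return value as A on Pre_.

-- ===== PORT A =====
-- matrix[0][i] / matrix[j][0] as A writes them (defaults never used inside Pre_)
def pvRowLabel (matrix : List (List String)) (i : Nat) : List Char :=
  ((matrix.getD 0 []).getD i "").toList
def pvColLabel (matrix : List (List String)) (j : Nat) : List Char :=
  ((matrix.getD j []).getD 0 "").toList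

-- inner loop of find_position_in_matrix: for j in range(1, len(row)): if row[j] == char: return j
def pvFindJ (cells : List String) (j : Nat) (t : List Char) : Option Nat :=
  match cells with
  | [] => none
  | x :: rest => if x.toList == t then some j else pvFindJ rest (j + 1) t

-- outer loop: for i in range(1, len(matrix)): …
def pvScanRows (matrix : List (List String)) (rows : List (List String)) (i : Nat)
    (t : List Char) : Option (List Char × List Char) :=
  match rows with
  | [] => none
  | row :: rest =>
    match pvFindJ (row.drop 1) 1 t with
    | some j => some (pvRowLabel matrix i, pvColLabel matrix j)
    | none => pvScanRows matrix rest (i + 1) t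

def find_position_in_matrix (matrix : List (List String)) (c : Char) :
    Option (List Char × List Char) :=
  pvScanRows matrix (matrix.drop 1) 1 [c]

-- for i in range(len(text)): grid[i % col_count] += text[i]
def pvFillA (n : Nat) (grid : List (List Char)) (i : Nat) (t : List Char) : List (List Char) :=
  match t with
  | [] => grid
  | c :: rest => pvFillA n (grid.modify (i % n) (· ++ [c])) (i + 1) rest

-- sorted(range(len(key)), key=lambda k: key[k])
def pvKeyOrder (kc : List Char) : List Int :=
  PySem.List.sorted (PySem.List.pyRange 0 (kc.length : Int) 1) (fun k => PySem.List.pyGetD kc k ' ') false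

def columnar_transposition (t : List Char) (kc : List Char) : List Char :=
  let grid := pvFillA kc.length (List.replicate kc.length []) 0 t
  ((pvKeyOrder kc).map (fun i => PySem.List.pyGetD grid i [])).flatten

-- split_into_groups; size = 0 raises in Python (excluded by Pre_), result there is arbitrary
def split_into_groups (t : List Char) (kc : List Char) : List Char :=
  if kc.length = 0 then [] else
  let cleaned := PySem.Chars.strip (PySem.Chars.replace t [' '] [])
  PySem.Chars.join [' ']
    ((PySem.List.pyRange 0 (cleaned.length : Int) (kc.length : Int)).map
      (fun i => PySem.List.slice cleaned (some i) (some (i + (kc.length : Int)))))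

def adfgx_encrypt (text : String) (key : String) (matrix : List (List String)) : String :=
  let enc := text.toList.foldl (fun acc c =>
    match find_position_in_matrix matrix c with
    | some p => acc ++ p.1 ++ p.2
    | none => acc) []   -- Python raises ValueError here; excluded by Pre_
  String.ofList (split_into_groups (columnar_transposition enc key.toList) key.toList)

-- ===== PORT B =====
-- loc.setdefault(cell, (i, j)) over one row's inner cells
def pvLocRow (i : Nat) (cells : List String) (j : Nat)
    (d : PySem.Dict (List Char) (Nat × Nat)) : PySem.Dict (List Char) (Nat × Nat) :=
  match cells with
  | [] => d
  | x :: rest =>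
    pvLocRow i rest (j + 1)
      (if d.contains x.toList then d else d.insert x.toList (i, j))

def pvLocDict (rows : List (List String)) (i : Nat)
    (d : PySem.Dict (List Char) (Nat × Nat)) : PySem.Dict (List Char) (Nat × Nat) :=
  match rows with
  | [] => d
  | row :: rest => pvLocDict rest (i + 1) (pvLocRow i (row.drop 1) 1 d)

-- encode(c): matrix[0][i] + matrix[j][0] at loc[c]; missing char raises KeyError (outside Pre_)
def pvEncode (matrix : List (List String)) (d : PySem.Dict (List Char) (Nat × Nat))
    (c : Char) : List Char :=
  match d.get? [c] with
  | some (i, j) => pvRowLabel matrix i ++ pvColLabel matrix j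
  | none => []

-- ''.join(ch for idx, ch in enumerate(stream) if idx % n == k)
def pvColumn (stream : List Char) (n : Nat) (k : Int) : List Char :=
  (PySem.List.enumerate stream 0).filterMap
    (fun p => if PySem.Int.mod p.1 (n : Int) = k then some p.2 else none)

-- while cleaned: groups.append(cleaned[:n]); cleaned = cleaned[n:]   (key "" is excluded by Pre_)
def pvGroupsB (n : Nat) (cs : List Char) : List (List Char) :=
  match cs with
  | [] => []
  | c :: rest =>
    if _h : n = 0 then [] else
      (c :: rest).take n :: pvGroupsB n ((c :: rest).drop n)
termination_by cs.length
decreasing_by simp; omega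

def adfgx_encrypt_alt (text : String) (key : String) (matrix : List (List String)) : String :=
  let loc := pvLocDict (matrix.drop 1) 1 PySem.Dict.empty
  let stream := text.toList.flatMap (pvEncode matrix loc)
  let n := key.toList.length
  let transposed := (pvKeyOrder key.toList).flatMap (pvColumn stream n)
  let cleaned := PySem.Chars.strip (PySem.Chars.replace transposed [' '] [])
  String.ofList (PySem.Chars.join [' '] (pvGroupsB n cleaned))

-- ===== PRECONDITION & SPEC =====
-- all inner cells of the matrix with their Python indices, in A's scan order
def pvCells (matrix : List (List String)) : List (Nat × Nat × List Char) :=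
  ((matrix.drop 1).zipIdx 1).flatMap
    (fun ri => ((ri.1.drop 1).zipIdx 1).map (fun cj => (ri.2, cj.2, cj.1.toList)))

def pvFirst (matrix : List (List String)) (c : Char) : Option (Nat × Nat) :=
  ((pvCells matrix).find? (fun e => e.2.2 == [c])).map (fun e => (e.1, e.2.1))

-- the found cell's row/column labels exist (A indexes matrix[0][i] and matrix[j][0])
def pvLabelOK (matrix : List (List String)) (i j : Nat) : Bool :=
  decide (i < (matrix.getD 0 []).length) && decide (j < matrix.length) &&
    !(matrix.getD j []).isEmpty

def pvFoundOK (matrix : List (List String)) (c : Char) : Bool :=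
  match pvFirst matrix c with
  | some (i, j) => pvLabelOK matrix i j
  | none => false

-- Pre_ excludes exactly the inputs where A raises: an empty key (ValueError)
-- and any text character whose first matching matrix cell is absent or lacks
-- row/column labels (ValueError/IndexError).
def Pre_adfgx_encrypt (text : String) (key : String) (matrix : List (List String)) : Prop :=
  key ≠ "" ∧ text.toList.all (fun c => pvFoundOK matrix c) = true
instance (text : String) (key : String) (matrix : List (List String)) :
    Decidable (Pre_adfgx_encrypt text key matrix) := by unfold Pre_adfgx_encrypt; infer_instance

def pvWitness_adfgx_encrypt : String × String × List (List String) :=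
  ("A", "B", [["x", "A"], ["A", "A"]])

def Spec_adfgx_encrypt (text : String) (key : String) (matrix : List (List String)) (out : String) : Prop := out = adfgx_encrypt_alt text key matrix
instance (text : String) (key : String) (matrix : List (List String)) (out : String) : Decidable (Spec_adfgx_encrypt text key matrix out) := by unfold Spec_adfgx_encrypt; infer_instance

-- ===== CLAIM (what is proved, stated in full; the proofs are below) =====
def Claim_equal_adfgx_encrypt : Prop := ∀ (text : String) (key : String) (matrix : List (List String)), Dom_adfgx_encrypt text key matrix → Pre_adfgx_encrypt text key matrix → Spec_adfgx_encrypt text key matrix (adfgx_encrypt text key matrix)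


-- ===== LEMMAS AND PROOFS =====

-- A's inner scan is find? over the indexed cells of the row
lemma pvFindJ_eq (cells : List String) (j : Nat) (t : List Char) :
    pvFindJ cells j t = ((cells.zipIdx j).find? (fun cj => cj.1.toList == t)).map (·.2) := by
  induction cells generalizing j with
  | nil => rfl
  | cons x rest ih =>
    simp only [pvFindJ, List.zipIdx_cons, List.find?_cons]
    by_cases h : x.toList == t <;> simp [h, ih]

-- A's double scan is find? over pvCells-from-here
lemma pvScanRows_eq (matrix : List (List String)) (rows : List (List String)) (i : Nat)
    (t : List Char) :
    pvScanRows matrix rows i t =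
      (((rows.zipIdx i).flatMap
          (fun ri => ((ri.1.drop 1).zipIdx 1).map (fun cj => (ri.2, cj.2, cj.1.toList)))).find?
            (fun e => e.2.2 == t)).map
        (fun e => (pvRowLabel matrix e.1, pvColLabel matrix e.2.1)) := by
  induction rows generalizing i with
  | nil => rfl
  | cons row rest ih =>
    simp only [pvScanRows, List.zipIdx_cons, List.flatMap_cons, List.find?_append,
      List.find?_map, pvFindJ_eq]
    have hcomp : ((fun e : Nat × Nat × List Char => e.2.2 == t) ∘
        (fun cj : String × Nat => (i, cj.2, cj.1.toList))) =
        (fun cj : String × Nat => cj.1.toList == t) := rfl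
    rw [hcomp]
    rcases hf : List.find? (fun cj : String × Nat => cj.1.toList == t)
        ((row.drop 1).zipIdx 1) with _ | e
    · simp only [Option.map_none, Option.none_or]
      exact ih (i + 1)
    · simp only [Option.map_some, Option.some_or]

-- B's setdefault over one row: get? = first match from here, else what was there
lemma pvLocRow_get? (i : Nat) (cells : List String) (j : Nat)
    (d : PySem.Dict (List Char) (Nat × Nat)) (k : List Char) :
    (pvLocRow i cells j d).get? k =
      (d.get? k).or
        (((cells.zipIdx j).find? (fun cj => cj.1.toList == k)).map (fun cj => (i, cj.2))) := by
  induction cells generalizing j d with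
  | nil => simp [pvLocRow]
  | cons x rest ih =>
    simp only [pvLocRow, List.zipIdx_cons, List.find?_cons]
    by_cases hc : d.contains x.toList
    · rw [if_pos hc, ih]
      by_cases hk : x.toList == k
      · have hks : x.toList = k := by simpa using hk
        have hsome : (d.get? k).isSome := by
          rw [← hks, ← PySem.Dict.contains_eq_isSome_get?]; exact hc
        rcases ho : d.get? k with _ | v
        · rw [ho] at hsome; simp at hsome
        · simp [hk]
      · simp [hk]
    · rw [if_neg hc, ih]
      by_cases hk : x.toList == k
      · have hks : x.toList = k := by simpa using hk
        have ho : d.get? k = none := by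
          rw [← hks]
          rcases hg : d.get? x.toList with _ | v
          · rfl
          · exfalso; rw [PySem.Dict.contains_eq_isSome_get?, hg] at hc; simp at hc
        subst hks
        simp [ho]
      · have hne : k ≠ x.toList := fun h => by simp [h] at hk
        simp [hk, PySem.Dict.get?_insert, hne]

-- B's setdefault over the rows
lemma pvLocDict_get? (rows : List (List String)) (i : Nat)
    (d : PySem.Dict (List Char) (Nat × Nat)) (k : List Char) :
    (pvLocDict rows i d).get? k =
      (d.get? k).or
        ((((rows.zipIdx i).flatMap
            (fun ri => ((ri.1.drop 1).zipIdx 1).map (fun cj => (ri.2, cj.2, cj.1.toList)))).find?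
              (fun e => e.2.2 == k)).map (fun e => (e.1, e.2.1))) := by
  induction rows generalizing i d with
  | nil => simp [pvLocDict]
  | cons row rest ih =>
    simp only [pvLocDict, List.zipIdx_cons, List.flatMap_cons, List.find?_append,
      List.find?_map, ih, pvLocRow_get?]
    have hcomp : ((fun e : Nat × Nat × List Char => e.2.2 == k) ∘
        (fun cj : String × Nat => (i, cj.2, cj.1.toList))) =
        (fun cj : String × Nat => cj.1.toList == k) := rfl
    rw [hcomp]
    rcases hf : List.find? (fun cj : String × Nat => cj.1.toList == k)
        ((row.drop 1).zipIdx 1) with _ | e <;>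
      rcases hd : d.get? k with _ | v <;> simp

-- per-character agreement: A's pair stream equals B's encode
lemma pair_agree (matrix : List (List String)) (c : Char)
    (h : pvFoundOK matrix c = true) :
    (match find_position_in_matrix matrix c with
      | some p => p.1 ++ p.2
      | none => []) =
    pvEncode matrix (pvLocDict (matrix.drop 1) 1 PySem.Dict.empty) c := by
  unfold pvFoundOK pvFirst at h
  rcases hf : (pvCells matrix).find? (fun e => e.2.2 == [c]) with _ | e
  · rw [hf] at h; simp at h
  · have hA : find_position_in_matrix matrix c =
        some (pvRowLabel matrix e.1, pvColLabel matrix e.2.1) := by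
      unfold find_position_in_matrix
      rw [pvScanRows_eq]
      unfold pvCells at hf
      rw [hf]
      rfl
    have hB : (pvLocDict (matrix.drop 1) 1 PySem.Dict.empty).get? [c] = some (e.1, e.2.1) := by
      rw [pvLocDict_get?]
      unfold pvCells at hf
      rw [hf]
      simp
    rw [hA]
    unfold pvEncode
    rw [hB]

-- A's substitution loop builds the flattened pair stream
lemma subst_eq_flatMap (matrix : List (List String)) (t : List Char) (acc : List Char) :
    t.foldl (fun acc c =>
      match find_position_in_matrix matrix c with
      | some p => acc ++ p.1 ++ p.2
      | none => acc) acc =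
    acc ++ t.flatMap (fun c =>
      match find_position_in_matrix matrix c with
      | some p => p.1 ++ p.2
      | none => []) := by
  induction t generalizing acc with
  | nil => simp
  | cons c rest ih =>
    simp only [List.foldl_cons, List.flatMap_cons, ih]
    rcases find_position_in_matrix matrix c with _ | p <;> simp

-- the round-robin grid's column k is the filtered gather from the stream
lemma fill_col (n k : Nat) (hk : k < n) (t : List Char) :
    ∀ (grid : List (List Char)) (i : Nat), grid.length = n →
    (pvFillA n grid i t).getD k [] =
      grid.getD k [] ++
        (t.zipIdx i).filterMap (fun p => if p.2 % n = k then some p.1 else none) := by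
  induction t with
  | nil => intro grid i hlen; simp [pvFillA]
  | cons c rest ih =>
    intro grid i hlen
    simp only [pvFillA, List.zipIdx_cons, List.filterMap_cons]
    rw [ih _ (i + 1) (by rw [List.length_modify]; exact hlen)]
    have hgd : (grid.modify (i % n) (· ++ [c])).getD k [] =
        if i % n = k then grid.getD k [] ++ [c] else grid.getD k [] := by
      have hk' : k < grid.length := by omega
      rw [List.getD, List.getD, List.getElem?_modify]
      rcases h : grid[k]? with _ | v
      · rw [List.getElem?_eq_none_iff] at h; omega
      · by_cases he : i % n = k <;> simp [he]
    rw [hgd]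
    by_cases he : i % n = k <;> simp [he, List.append_assoc]

-- B's Int-mod column equals the Nat-mod gather
lemma pvColumn_eq (stream : List Char) (n : Nat) (k : Nat) :
    pvColumn stream n (k : Int) =
      (stream.zipIdx 0).filterMap (fun p => if p.2 % n = k then some p.1 else none) := by
  unfold pvColumn
  rw [PySem.List.enumerate_eq_zipIdx_map, List.filterMap_map]
  congr 1
  funext p
  simp only [Function.comp]
  have hm : PySem.Int.mod ((0 : Int) + (p.2 : Int)) (n : Int) = ((p.2 % n : Nat) : Int) := by
    rw [zero_add]; exact_mod_cast PySem.Int.mod_natCast p.2 n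
  rw [hm]
  by_cases h : p.2 % n = k
  · rw [if_pos (show ((p.2 % n : Nat) : Int) = (k : Int) by exact_mod_cast h), if_pos h]
  · rw [if_neg (show ¬((p.2 % n : Nat) : Int) = (k : Int) by exact_mod_cast h), if_neg h]

-- chunk core: the range/slice comprehension on drop/take form equals B's take/drop loop
lemma chunk_core (n : Nat) (hn : n ≠ 0) (cs : List Char) :
    (List.range ((cs.length + n - 1) / n)).map (fun k => (cs.drop (n * k)).take n) =
      pvGroupsB n cs := by
  match cs with
  | [] =>
    have h0 : (([] : List Char).length + n - 1) / n = 0 := by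
      simp only [List.length_nil, Nat.zero_add]
      exact Nat.div_eq_of_lt (by omega)
    simp only [h0, List.range_zero, List.map_nil]
    rw [pvGroupsB]
  | c :: rest =>
    rw [pvGroupsB, dif_neg hn]
    have ihn := chunk_core n hn ((c :: rest).drop n)
    have hcnt : ((c :: rest).length + n - 1) / n = rest.length / n + 1 := by
      have h1 : (c :: rest).length + n - 1 = rest.length + n := by
        simp only [List.length_cons]; omega
      rw [h1, Nat.add_div_right _ (Nat.pos_of_ne_zero hn)]
    have hcnt' : (((c :: rest).drop n).length + n - 1) / n = rest.length / n := by
      rcases Nat.lt_or_ge rest.length n with h | h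
      · have h1 : ((c :: rest).drop n).length = 0 := by simp; omega
        rw [h1, Nat.zero_add, Nat.div_eq_of_lt (by omega), Nat.div_eq_of_lt h]
      · have h1 : ((c :: rest).drop n).length = rest.length + 1 - n := by simp
        have h2 : rest.length + 1 - n + n - 1 = rest.length - n + n := by omega
        rw [h1, h2, Nat.add_div_right _ (Nat.pos_of_ne_zero hn)]
        have h3 : rest.length = rest.length - n + n := by omega
        conv_rhs => rw [h3, Nat.add_div_right _ (Nat.pos_of_ne_zero hn)]
    rw [hcnt, List.range_succ_eq_map, List.map_cons, List.map_map]
    rw [hcnt'] at ihn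
    rw [← ihn]
    congr 1
    apply List.map_congr_left
    intro k hk
    simp only [Function.comp_apply, Nat.succ_eq_add_one, List.drop_drop]
    have h4 : n + n * k = n * (k + 1) := by ring
    rw [h4]
termination_by cs.length
decreasing_by simp; omega

-- A's whole grouping comprehension equals B's take/drop loop
lemma chunksA_eq (n : Nat) (hn : n ≠ 0) (cs : List Char) :
    (PySem.List.pyRange 0 (cs.length : Int) (n : Int)).map
      (fun i => PySem.List.slice cs (some i) (some (i + (n : Int)))) = pvGroupsB n cs := by
  rw [PySem.List.pyRange_of_pos 0 (cs.length : Int) (by exact_mod_cast Nat.pos_of_ne_zero hn)]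
  have hcount : (if (0 : Int) < (cs.length : Int)
      then (((cs.length : Int) - 0 + (n : Int) - 1) / (n : Int)).toNat else 0) =
      (cs.length + n - 1) / n := by
    by_cases h : 0 < cs.length
    · rw [if_pos (by exact_mod_cast h)]
      have h1 : ((cs.length : Int) - 0 + (n : Int) - 1) = ((cs.length + n - 1 : Nat) : Int) := by
        omega
      rw [h1]
      have h2 : (((cs.length + n - 1 : Nat) : Int) / ((n : Nat) : Int)).toNat
          = (cs.length + n - 1) / n := by
        rw [← Int.natCast_div, Int.toNat_natCast]
      exact h2
    · have h0 : cs.length = 0 := by omega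
      rw [if_neg (by simp [h0]), h0]
      simp only [Nat.zero_add]
      exact (Nat.div_eq_of_lt (by omega)).symm
  rw [hcount, List.map_map, ← chunk_core n hn cs]
  apply List.map_congr_left
  intro k hk
  simp only [Function.comp]
  have h1 : ((0 : Int) + (n : Int) * (k : Int)) = ((n * k : Nat) : Int) := by push_cast; ring
  rw [h1, PySem.List.slice_natCast_add]

-- ===== VERDICT (by name: the statement is the Claim_ definition above) =====
theorem adfgx_encrypt_spec : Claim_equal_adfgx_encrypt := by
  intro text key matrix _ hPre
  unfold Spec_adfgx_encrypt
  obtain ⟨hkey, hfoundB⟩ := hPre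
  have hfound : ∀ c ∈ text.toList, pvFoundOK matrix c = true := by
    simpa using hfoundB
  have hn : key.toList.length ≠ 0 := by
    intro h
    exact hkey (String.toList_eq_nil_iff.mp (List.eq_nil_of_length_eq_zero h))
  simp only [adfgx_encrypt, adfgx_encrypt_alt, columnar_transposition, split_into_groups,
    if_neg hn]
  rw [subst_eq_flatMap, List.nil_append]
  have henc : text.toList.flatMap (fun c =>
      match find_position_in_matrix matrix c with
      | some p => p.1 ++ p.2
      | none => []) =
      text.toList.flatMap (pvEncode matrix (pvLocDict (matrix.drop 1) 1 PySem.Dict.empty)) := by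
    rw [List.flatMap_def, List.flatMap_def,
      List.map_congr_left (fun c hc => pair_agree matrix c (hfound c hc))]
  rw [henc]
  have htrans : ∀ s : List Char,
      ((pvKeyOrder key.toList).map (fun i => PySem.List.pyGetD
        (pvFillA key.toList.length (List.replicate key.toList.length []) 0 s) i [])).flatten =
      (pvKeyOrder key.toList).flatMap (pvColumn s key.toList.length) := by
    intro s
    rw [List.flatMap_def]
    congr 1
    apply List.map_congr_left
    intro kk hkk
    have hmem : (0 : Int) ≤ kk ∧ kk < (key.toList.length : Int) := by
      have h1 := (PySem.List.mem_sorted _ _ _ kk).mp hkk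
      exact PySem.List.mem_pyRange_one.mp h1
    obtain ⟨hk0, hkn⟩ := hmem
    lift kk to Nat using hk0 with k'
    have hk'n : k' < key.toList.length := by exact_mod_cast hkn
    rw [PySem.List.pyGetD_natCast, pvColumn_eq]
    rw [fill_col key.toList.length k' hk'n s (List.replicate key.toList.length []) 0 (by simp)]
    rw [List.getD_replicate ([] : List Char) hk'n, List.nil_append]
  rw [htrans _, chunksA_eq _ hn]
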